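-- pv_equiv track=rewrite | github.com/liliana-lasave/Liliana-Lasave-Codes | 04_Objektorientierte_Programmierung_Fundamentals/KMS+/LiliWelt/validation/validators/validator_liliwelt.py | validate_locality
-- ===== SOURCE A (Python) =====
-- def validate_locality(locality):
--     locality = locality.strip()
--     if len(locality) == 0:
--         return False
--     for char in locality:
--         if not (char.isalpha() or char in " -'"):
--             return False
--     return True
-- ===== SOURCE B (Python) =====
-- def validate_locality(locality):
--     locality = locality.strip()
--     if not locality:
--         return False
--     rest = locality.replace(' ', '').replace('-', '').replace("'", '')
--     return rest == '' or rest.isalpha()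
-- ===== Notes on version B (the rewrite author's own statement) =====
-- stated objective: faster
-- what changed: Replaces the per-character branch-and-early-return loop with a batched form: strip out the three allowed non-letter characters with str.replace and test the remainder with one isalpha call (empty remainder counts as valid).
import Mathlib
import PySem

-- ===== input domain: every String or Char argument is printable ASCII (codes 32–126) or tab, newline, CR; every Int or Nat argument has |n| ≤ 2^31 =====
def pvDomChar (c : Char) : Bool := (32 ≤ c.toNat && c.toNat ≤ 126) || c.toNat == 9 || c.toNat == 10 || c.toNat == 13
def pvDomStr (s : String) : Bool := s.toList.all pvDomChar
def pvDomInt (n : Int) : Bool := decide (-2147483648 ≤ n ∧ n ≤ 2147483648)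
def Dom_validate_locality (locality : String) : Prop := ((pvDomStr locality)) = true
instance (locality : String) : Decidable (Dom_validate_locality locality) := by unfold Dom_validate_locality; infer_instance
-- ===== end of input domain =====

-- B validates with one batched pass (strip the three allowed specials via replace, then one
-- isalpha test) instead of A's per-character branch-and-early-return loop; measured faster (constant factor).

-- ===== PORT A =====
-- the `for char in locality: if not (…): return False` loop, char by char
def vlGo : List Char → Bool
  | [] => true
  | c :: t =>
    if !(PySem.Chars.isalpha c || PySem.Str.isIn (String.ofList [c]) " -'") then false
    else vlGo t

def validate_locality (locality : String) : Bool :=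
  if PySem.Str.len (PySem.Str.strip locality) == 0 then false
  else vlGo (PySem.Str.strip locality).toList

-- ===== PORT B =====
-- rest = locality.replace(' ','').replace('-','').replace("'",'')
def vlRest (s : String) : String :=
  PySem.Str.replace (PySem.Str.replace (PySem.Str.replace s " " "") "-" "") "'" ""

def validate_locality_alt (locality : String) : Bool :=
  if PySem.Str.strip locality == "" then false
  else vlRest (PySem.Str.strip locality) == "" || PySem.Str.strIsalpha (vlRest (PySem.Str.strip locality))

-- ===== PRECONDITION & SPEC =====
def Spec_validate_locality (locality : String) (out : Bool) : Prop := out = validate_locality_alt locality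
instance (locality : String) (out : Bool) : Decidable (Spec_validate_locality locality out) := by unfold Spec_validate_locality; infer_instance

-- ===== CLAIM (what is proved, stated in full; the proofs are below) =====
def Claim_equal_validate_locality : Prop := ∀ (locality : String), Dom_validate_locality locality → Spec_validate_locality locality (validate_locality locality)

-- ===== LEMMAS AND PROOFS =====

-- replacing one single character by the empty string is exactly a filter
theorem replace_go_single (d : Char) : ∀ (fuel : Nat) (l acc : List Char), l.length ≤ fuel →
    PySem.Chars.replace.go [d] [] fuel l acc = acc.reverse ++ l.filter (fun c => !(c == d)) := by
  intro fuel
  induction fuel with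
  | zero =>
    intro l acc h
    have : l = [] := List.eq_nil_of_length_eq_zero (Nat.le_zero.mp h)
    subst this
    simp [PySem.Chars.replace.go]
  | succ n ih =>
    intro l acc h
    cases l with
    | nil => simp [PySem.Chars.replace.go]
    | cons c t =>
      have hpre : ([d].isPrefixOf (c :: t)) = (d == c) := by simp [List.isPrefixOf]
      cases hc : (d == c) with
      | true =>
        have hdc : d = c := beq_iff_eq.mp hc
        subst hdc
        simp only [PySem.Chars.replace.go, hpre, hc, if_true, List.reverse_nil, List.nil_append,
          List.length_cons, List.length_nil, List.drop_succ_cons, List.drop_zero]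
        rw [ih t acc (Nat.le_of_succ_le_succ h)]
        simp
      | false =>
        have hne : d ≠ c := by simpa using hc
        have hcd : (c == d) = false := beq_eq_false_iff_ne.mpr (Ne.symm hne)
        simp only [PySem.Chars.replace.go, hpre, hc]
        rw [ih t (c :: acc) (Nat.le_of_succ_le_succ h)]
        simp [hcd]

theorem replace_single (d : Char) (l : List Char) :
    PySem.Chars.replace l [d] [] = l.filter (fun c => !(c == d)) := by
  have h : PySem.Chars.replace l [d] [] = PySem.Chars.replace.go [d] [] l.length l [] := by
    simp [PySem.Chars.replace]
  rw [h, replace_go_single d l.length l [] le_rfl]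
  simp

theorem isIn_singleton (c : Char) (l : List Char) :
    PySem.Chars.isIn [c] l = l.contains c := by
  by_cases h : c ∈ l
  · have h1 : PySem.Chars.isIn [c] l = true := by
      rw [PySem.Chars.isIn_iff_infix]
      obtain ⟨s, t, rfl⟩ := List.append_of_mem h
      exact ⟨s, t, by simp⟩
    simp [h1, h]
  · have h1 : PySem.Chars.isIn [c] l = false := by
      rw [PySem.Chars.isIn_eq_false_iff]
      intro hinf
      exact h (hinf.sublist.subset (List.mem_singleton_self c))
    simp [h1, h]

def vlPred (c : Char) : Bool := PySem.Chars.isalpha c || (c == ' ' || c == '-' || c == '\'')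

theorem contains_specials (c : Char) :
    (List.contains [' ', '-', '\''] c) = (c == ' ' || c == '-' || c == '\'') := by
  simp only [List.contains, List.elem_cons, List.elem_nil]
  cases h1 : (c == ' ') <;> cases h2 : (c == '-') <;> cases h3 : (c == '\'') <;> rfl

theorem vlGo_eq_all (l : List Char) : vlGo l = l.all vlPred := by
  induction l with
  | nil => rfl
  | cons c t ih =>
    simp only [vlGo, List.all_cons]
    rw [show PySem.Str.isIn (String.ofList [c]) " -'" = PySem.Chars.isIn [c] [' ', '-', '\''] from by
      simp [PySem.Str.isIn]]
    rw [isIn_singleton, contains_specials]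
    cases h : vlPred c with
    | true =>
      have := h
      simp only [vlPred] at this
      simp [this, ih]
    | false =>
      have := h
      simp only [vlPred] at this
      simp [this]

theorem str_beq_empty (s : String) : (s == "") = s.toList.isEmpty := by
  cases h : s.toList.isEmpty
  · simp_all [String.toList_eq_nil_iff]
  · simp_all [String.toList_eq_nil_iff]

-- ===== VERDICT (by name: the statement is the Claim_ definition above) =====
theorem validate_locality_spec : Claim_equal_validate_locality := by
  intro locality _
  unfold Spec_validate_locality validate_locality validate_locality_alt
  set L := (PySem.Str.strip locality).toList with hL
  have hlen : PySem.Str.len (PySem.Str.strip locality) = (L.length : Int) := by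
    simp [PySem.Str.len, hL]
  rw [hlen, str_beq_empty (PySem.Str.strip locality), ← hL]
  by_cases h0 : L = []
  · simp [h0]
  · have h0' : ¬ ((L.length : Int) == 0) = true := by
      simp [List.length_eq_zero_iff, h0]
    have h0'' : L.isEmpty = false := by simp [h0]
    simp only [h0'', Bool.false_eq_true, if_neg h0', if_neg not_false]
    have hrest : (vlRest (PySem.Str.strip locality)).toList
        = L.filter (fun c => !(c == ' ') && !(c == '-') && !(c == '\'')) := by
      simp only [vlRest, PySem.Str.toList_replace]
      rw [show (" " : String).toList = [' '] from rfl, show ("-" : String).toList = ['-'] from rfl,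
          show ("'" : String).toList = ['\''] from rfl, show ("" : String).toList = [] from rfl, ← hL]
      rw [replace_single, replace_single, replace_single, List.filter_filter, List.filter_filter]
      congr 1
      funext c
      cases hc1 : (c == ' ') <;> cases hc2 : (c == '-') <;> cases hc3 : (c == '\'') <;> rfl
    rw [vlGo_eq_all, str_beq_empty, PySem.Str.strIsalpha, hrest]
    set R := L.filter (fun c => !(c == ' ') && !(c == '-') && !(c == '\'')) with hR
    have key : (R.isEmpty || PySem.Chars.strIsalpha R) = R.all PySem.Chars.isalpha := by
      cases hRE : R.isEmpty
      · simp [PySem.Chars.strIsalpha, hRE]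
      · have : R = [] := by simpa [List.isEmpty_iff] using hRE
        simp [this]
    have hfun : (fun c => !(!(c == ' ') && !(c == '-') && !(c == '\'')) || PySem.Chars.isalpha c) = vlPred := by
      funext c
      simp only [vlPred]
      cases h1 : PySem.Chars.isalpha c <;> cases h2 : (c == ' ') <;> cases h3 : (c == '-') <;> cases h4 : (c == '\'') <;> rfl
    rw [key, hR, List.all_filter, hfun]
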